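-- pv_equiv track=rewrite | github.com/SrMule/Pruebas_Tcnicas | Python/numero_faltante.py | mmn3
-- ===== SOURCE A (Python) =====
-- def mmn3(lista):
--     if len(lista) == 1:
--         return 0
--     else:
--         lista_set = set(lista)
--         for i in range(min(lista) + 1, max(lista) + 1):
--             if i not in lista_set:
--                 return i
--         return min(lista) - 1
-- ===== SOURCE B (Python) =====
-- def mmn3(lista):
--     if len(lista) == 1:
--         return 0
--     lo = min(lista)
--     s = sorted(set(lista))
--     expected = lo + 1
--     for v in s[1:]:
--         if v == expected:
--             expected += 1
--         elif v > expected: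
--             return expected
--     return lo - 1
-- ===== Notes on version B (the rewrite author's own statement) =====
-- stated objective: alternative
-- what changed: Instead of scanning every integer in [min+1, max] with a set-membership test, B sorts the distinct values once and walks them pairwise against an expected counter, returning at the first gap; it trades the value-range scan for an O(n log n) sort independent of the numeric span.
import Mathlib
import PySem

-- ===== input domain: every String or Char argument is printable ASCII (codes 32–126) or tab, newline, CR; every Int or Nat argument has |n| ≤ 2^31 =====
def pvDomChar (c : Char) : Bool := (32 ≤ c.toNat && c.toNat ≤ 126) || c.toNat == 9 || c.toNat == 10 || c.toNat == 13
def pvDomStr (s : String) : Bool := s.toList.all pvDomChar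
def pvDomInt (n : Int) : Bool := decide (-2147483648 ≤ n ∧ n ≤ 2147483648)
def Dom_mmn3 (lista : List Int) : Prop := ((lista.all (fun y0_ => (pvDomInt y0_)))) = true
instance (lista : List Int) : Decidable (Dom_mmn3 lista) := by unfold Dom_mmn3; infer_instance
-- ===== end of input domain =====

-- B replaces A's scan of every integer in [min+1, max] (set-membership per integer) by one
-- sort of the distinct values and a pairwise walk against an expected counter.

-- ===== PORT A =====
-- 'for i in range(min+1, max+1): if i not in lista_set: return i' / 'return min - 1'
-- range(min+1, max+1) is iterated lazily with early return, as in Python: the loop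
-- variable i starts at min+1 and the fuel is the range's length (max+1)-(min+1).
def mmn3Find (s : PySem.Set Int) (lo : Int) : Nat → Int → Int
  | 0, _ => lo - 1
  | fuel + 1, i => if !(PySem.Set.contains s i) then i else mmn3Find s lo fuel (i + 1)

def mmn3 (lista : List Int) : Int :=
  if lista.length = 1 then 0
  else
    let listaSet : PySem.Set Int := PySem.Set.ofList lista
    -- min(lista)/max(lista): ValueError on [] is excluded by Pre_mmn3
    match PySem.List.min? lista (fun x => x), PySem.List.max? lista (fun x => x) with
    | some lo, some hi => mmn3Find listaSet lo ((hi + 1) - (lo + 1)).toNat (lo + 1)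
    | _, _ => 0  -- unreachable: lista ≠ [] under Pre_mmn3

-- ===== PORT B =====
-- walk s[1:] with the running 'expected' value; return at the first gap
def mmn3Scan (lo : Int) (expected : Int) : List Int → Int
  | [] => lo - 1
  | v :: rest =>
      if v = expected then mmn3Scan lo (expected + 1) rest
      else if v > expected then expected
      else mmn3Scan lo expected rest

def mmn3_alt (lista : List Int) : Int :=
  if lista.length = 1 then 0
  else
    match PySem.List.min? lista (fun x => x) with
    | none => 0  -- unreachable: min([]) raises, excluded by Pre_mmn3
    | some lo =>
      let s := PySem.List.sorted (PySem.Set.ofList lista) (fun x => x) false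
      mmn3Scan lo (lo + 1) (s.drop 1)  -- s[1:]

-- ===== PRECONDITION & SPEC =====
-- Pre_ excludes only the empty list, on which both A's min(lista) and B's min(lista) raise ValueError.
def Pre_mmn3 (lista : List Int) : Prop := lista ≠ []
instance (lista : List Int) : Decidable (Pre_mmn3 lista) := by unfold Pre_mmn3; infer_instance

def pvWitness_mmn3 : List Int := [1, 3]

def Spec_mmn3 (lista : List Int) (out : Int) : Prop := out = mmn3_alt lista
instance (lista : List Int) (out : Int) : Decidable (Spec_mmn3 lista out) := by unfold Spec_mmn3; infer_instance

-- ===== CLAIM (what is proved, stated in full; the proofs are below) =====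
def Claim_equal_mmn3 : Prop := ∀ (lista : List Int), Dom_mmn3 lista → Pre_mmn3 lista → Spec_mmn3 lista (mmn3 lista)

-- ===== LEMMAS AND PROOFS =====

-- Core correspondence: scanning the integer range [e, hi] with membership tests in S equals
-- walking t, the strictly sorted list of the elements of S that are ≥ e.
theorem mmn3_find_eq_scan (S : PySem.Set Int) (lo hi : Int)
    (hhi : PySem.Set.contains S hi = true)
    (hub : ∀ x : Int, PySem.Set.contains S x = true → x ≤ hi) :
    ∀ (n : Nat) (e : Int), (hi + 1 - e).toNat = n → ∀ (t : List Int),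
      t.Pairwise (· < ·) →
      (∀ x : Int, x ∈ t ↔ (PySem.Set.contains S x = true ∧ e ≤ x)) →
      mmn3Find S lo n e = mmn3Scan lo e t := by
  intro n
  induction n with
  | zero =>
    intro e he t hp hm
    have he' : hi + 1 ≤ e := by omega
    have ht : t = [] := by
      cases t with
      | nil => rfl
      | cons a t' =>
        exfalso
        have h1 := (hm a).mp (List.mem_cons_self ..)
        have h2 := hub a h1.1
        omega
    subst ht; rfl
  | succ n ih =>
    intro e he t hp hm
    have helt : e < hi + 1 := by omega
    by_cases hc : PySem.Set.contains S e = true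
    · have het : e ∈ t := (hm e).mpr ⟨hc, le_refl e⟩
      cases t with
      | nil => simp at het
      | cons a t' =>
        have hp' := List.pairwise_cons.mp hp
        have ha : a = e := by
          rcases List.mem_cons.mp het with h | h
          · exact h.symm
          · have h1 := hp'.1 e h
            have h2 := ((hm a).mp (List.mem_cons_self ..)).2
            omega
        simp only [mmn3Find, hc, Bool.not_true, Bool.false_eq_true, if_false, mmn3Scan]
        rw [if_pos ha]
        apply ih (e + 1) (by omega) t' hp'.2
        intro x
        constructor
        · intro hx
          have hxS := (hm x).mp (List.mem_cons_of_mem _ hx)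
          have hgt := hp'.1 x hx
          exact ⟨hxS.1, by omega⟩
        · rintro ⟨hxS, hex⟩
          have hxt : x ∈ a :: t' := (hm x).mpr ⟨hxS, by omega⟩
          rcases List.mem_cons.mp hxt with h | h
          · subst ha; omega
          · exact h
    · have hte : hi ∈ t := (hm hi).mpr ⟨hhi, by omega⟩
      cases t with
      | nil => simp at hte
      | cons a t' =>
        have haS := (hm a).mp (List.mem_cons_self ..)
        have hane : a ≠ e := fun h => hc (h ▸ haS.1)
        have hgt : e < a := lt_of_le_of_ne haS.2 (Ne.symm hane)
        simp only [mmn3Find, hc, Bool.not_false, if_true, mmn3Scan,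
          if_neg hane, if_pos hgt]

theorem mmn3_spec : Claim_equal_mmn3 := by
  intro lista _ hne
  unfold Spec_mmn3 mmn3 mmn3_alt
  by_cases h1 : lista.length = 1
  · simp [h1]
  · simp only [h1, if_false]
    obtain ⟨lo, hlo⟩ : ∃ lo, PySem.List.min? lista (fun x => x) = some lo := by
      cases hm : PySem.List.min? lista (fun x => x) with
      | none => exact absurd ((PySem.List.min?_eq_none_iff _ _).mp hm) hne
      | some m => exact ⟨m, rfl⟩
    obtain ⟨hi, hhi⟩ : ∃ hi, PySem.List.max? lista (fun x => x) = some hi := by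
      cases hm : PySem.List.max? lista (fun x => x) with
      | none => exact absurd ((PySem.List.max?_eq_none_iff _ _).mp hm) hne
      | some m => exact ⟨m, rfl⟩
    rw [hlo, hhi]
    have hloMem : lo ∈ lista := PySem.List.min?_mem hlo
    have hloMin : ∀ y ∈ lista, lo ≤ y := PySem.List.min?_isMin hlo
    have hhiMem : hi ∈ lista := PySem.List.max?_mem hhi
    have hhiMax : ∀ y ∈ lista, y ≤ hi := PySem.List.max?_isMax hhi
    have hpair := PySem.List.sorted_ofList_pairwise_lt (xs := lista)
    have hmemS : ∀ x : Int,
        x ∈ PySem.List.sorted (PySem.Set.ofList lista) (fun x => x) false ↔ x ∈ lista := by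
      intro x; rw [PySem.List.mem_sorted, PySem.Set.mem_ofList]
    rcases hsE : PySem.List.sorted (PySem.Set.ofList lista) (fun x => x) false with _ | ⟨a, t⟩
    · exfalso
      have hin : lo ∈ PySem.List.sorted (PySem.Set.ofList lista) (fun x => x) false :=
        (hmemS lo).mpr hloMem
      rw [hsE] at hin
      simp at hin
    · rw [hsE] at hpair hmemS
      have hp' := List.pairwise_cons.mp hpair
      have ha : a = lo := by
        have h1 : lo ≤ a := hloMin a ((hmemS a).mp (List.mem_cons_self ..))
        have h2 : a ≤ lo := by
          rcases List.mem_cons.mp ((hmemS lo).mpr hloMem) with h | h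
          · omega
          · have := hp'.1 lo h; omega
        omega
      subst ha
      simp only [List.drop_succ_cons, List.drop_zero]
      apply mmn3_find_eq_scan (PySem.Set.ofList lista) a hi
        ((PySem.Set.contains_iff _ _).mpr ((PySem.Set.mem_ofList _ _).mpr hhiMem))
        (fun x hx => hhiMax x ((PySem.Set.mem_ofList _ _).mp ((PySem.Set.contains_iff _ _).mp hx)))
        ((hi + 1) - (a + 1)).toNat (a + 1) rfl t hp'.2
      intro x
      constructor
      · intro hx
        have hxl := (hmemS x).mp (List.mem_cons_of_mem _ hx)
        have := hp'.1 x hx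
        exact ⟨(PySem.Set.contains_iff _ _).mpr ((PySem.Set.mem_ofList _ _).mpr hxl), by omega⟩
      · rintro ⟨hxS, hax⟩
        have hxl : x ∈ lista := (PySem.Set.mem_ofList _ _).mp ((PySem.Set.contains_iff _ _).mp hxS)
        rcases List.mem_cons.mp ((hmemS x).mpr hxl) with h | h
        · omega
        · exact h
-- ===== VERDICT (by name: the statement is the Claim_ definition above) =====
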